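-- pv_equiv track=rewrite | github.com/BelleGarlick/Comp61332-Text-Mining---Dream-Team | src/sentence_classifier/preprocessing/tokenisation/tokeniser.py | parse_quotes
-- ===== SOURCE A (Python) =====
-- from typing import List
--
-- TOKEN_CHAR_QUOTE = "#QUOTE#"
--
-- def parse_quotes(tokens: List[str]) -> List[str]:
--     """
--     Parse quote marks from a token list.
--
--     This function will search for any quotations within the list of tokens and replace them with #QUOTE#. Often the data
--     within the quote is not useful for the question description, therefore it is benificial to remove the quotes and
--     replace them with the #QUOTE# Token.
--
--     Args:
--         tokens: List of strings which make up the question.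
--
--     Return:
--         List of tokens with all quotes removed.
--     """
--     if "``" in tokens:
--         # Store the indicies of the quotations in here.
--         quotes = []
--
--         # Search through the list of tags which make up a quote.
--         start = -1
--         for i in range(len(tokens)):
--             if tokens[i] == "``":
--                 start = i
--             if start != -1 and tokens[i] == "''":
--                 quotes.append((start, i))
--                 start = -1
--
--         # Remove quote in reverse order to ensure indicies remain intact.
--         quotes.reverse()
--         for quote in quotes:
--             tokens[quote[0]] = TOKEN_CHAR_QUOTE
--             del tokens[quote[0] + 1: quote[1] + 1]
--
--     return tokens
-- ===== SOURCE B (Python) =====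
-- from typing import List
--
-- TOKEN_CHAR_QUOTE = "#QUOTE#"
--
-- def parse_quotes(tokens: List[str]) -> List[str]:
--     """Single forward pass: build a result list, remembering the result index of
--     the most recent ``; on a matching '' truncate back to it and emit #QUOTE#.
--     Mutates `tokens` in place (tokens[:] = result), like the original."""
--     result = []
--     start = None
--     for t in tokens:
--         if t == "''" and start is not None:
--             del result[start:]
--             result.append(TOKEN_CHAR_QUOTE)
--             start = None
--         else:
--             if t == "``":
--                 start = len(result)
--             result.append(t)
--     tokens[:] = result
--     return tokens
-- ===== Notes on version B (the rewrite author's own statement) =====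
-- stated objective: simpler
-- what changed: A scans with indices collecting (start,end) pairs and then deletes slices of the original list in reverse order; B is a single forward pass that appends tokens to a fresh result list and, on a closing '' with a pending ``, truncates the result back to the remembered `` position and emits #QUOTE#, then assigns back via tokens[:]=result to keep A's in-place mutation.
import Mathlib
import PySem

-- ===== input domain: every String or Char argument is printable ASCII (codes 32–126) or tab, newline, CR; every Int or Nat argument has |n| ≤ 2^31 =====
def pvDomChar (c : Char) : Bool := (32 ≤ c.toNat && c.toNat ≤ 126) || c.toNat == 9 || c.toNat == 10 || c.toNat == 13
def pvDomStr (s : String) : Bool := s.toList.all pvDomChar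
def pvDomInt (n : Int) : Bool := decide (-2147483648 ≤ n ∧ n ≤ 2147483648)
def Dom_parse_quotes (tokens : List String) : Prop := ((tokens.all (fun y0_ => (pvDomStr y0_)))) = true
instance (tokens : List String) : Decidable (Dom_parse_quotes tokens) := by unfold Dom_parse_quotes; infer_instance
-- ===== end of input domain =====

-- B replaces A's two-phase index-pair collection + reverse slice-deletion by one forward
-- pass with truncation (objective: simpler); both Pythons mutate the argument list in
-- place to the same final content, the theorems are about the (identical) returned value.

-- ===== PORT A =====
-- the index loop "for i in range(len(tokens))" reading tokens[i], carried as a structural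
-- recursion over the list with the index i alongside (i always equals the position read)
def pqQuoteScan : List String → Int → List (Int × Int) → Int → List (Int × Int) × Int
  | [], _, quotes, start => (quotes, start)
  | t :: ts, i, quotes, start =>
    let start := if t = "``" then i else start
    if start ≠ -1 ∧ t = "''" then pqQuoteScan ts (i + 1) (quotes ++ [(start, i)]) (-1)
    else pqQuoteScan ts (i + 1) quotes start

def parse_quotes (tokens : List String) : List String :=
  if "``" ∈ tokens then
    let quotes := (pqQuoteScan tokens 0 [] (-1)).1
    -- quotes.reverse; then for quote in quotes: tokens[q.1] = "#QUOTE#"; del tokens[q.1+1 : q.2+1]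
    -- (the stored indices q.1, q.2 are ≥ 0 by construction, so .toNat is exact, and
    --  "del tokens[a:b]" for 0 ≤ a ≤ b < len is exactly take a ++ drop b)
    quotes.reverse.foldl (fun toks q =>
      let toks := toks.set q.1.toNat "#QUOTE#"
      toks.take (q.1.toNat + 1) ++ toks.drop (q.2.toNat + 1)) tokens
  else tokens

-- ===== PORT B =====
-- Python's `start = None / start is not None` carried as Option Nat
def pqAltLoop : List String → List String → Option Nat → List String
  | [], res, _ => res
  | t :: ts, res, start =>
    match start with
    | some s =>
      if t = "''" then pqAltLoop ts (res.take s ++ ["#QUOTE#"]) none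
      else pqAltLoop ts (res ++ [t]) (if t = "``" then some res.length else some s)
    | none => pqAltLoop ts (res ++ [t]) (if t = "``" then some res.length else none)

def parse_quotes_alt (tokens : List String) : List String :=
  pqAltLoop tokens [] none

-- ===== PRECONDITION & SPEC =====
def Spec_parse_quotes (tokens : List String) (out : List String) : Prop := out = parse_quotes_alt tokens
instance (tokens : List String) (out : List String) : Decidable (Spec_parse_quotes tokens out) := by unfold Spec_parse_quotes; infer_instance

-- ===== CLAIM (what is proved, stated in full; the proofs are below) =====
def Claim_equal_parse_quotes : Prop := ∀ (tokens : List String), Dom_parse_quotes tokens → Spec_parse_quotes tokens (parse_quotes tokens)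

-- ===== LEMMAS AND PROOFS =====

-- reference machine both ports are reduced to: `none` = no pending open quote,
-- `some buf` = pending open quote whose buffered tokens (the "``" and what followed) are buf
def pqGo : List String → Option (List String) → List String
  | [], none => []
  | [], some buf => buf
  | t :: ts, none => if t = "``" then pqGo ts (some [t]) else t :: pqGo ts none
  | t :: ts, some buf =>
    if t = "''" then "#QUOTE#" :: pqGo ts none
    else if t = "``" then buf ++ pqGo ts (some [t])
    else pqGo ts (some (buf ++ [t]))

-- one deletion step of A's second phase
def pqDel (toks : List String) (q : Int × Int) : List String :=
  let toks := toks.set q.1.toNat "#QUOTE#"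
  toks.take (q.1.toNat + 1) ++ toks.drop (q.2.toNat + 1)

lemma pqQuoteScan_acc (ts : List String) (i : Int) (qs : List (Int × Int)) (st : Int) :
    pqQuoteScan ts i qs st = (qs ++ (pqQuoteScan ts i [] st).1, (pqQuoteScan ts i [] st).2) := by
  induction ts generalizing i qs st with
  | nil => simp [pqQuoteScan]
  | cons t ts ih =>
    by_cases h1 : (if t = "``" then i else st) ≠ -1 ∧ t = "''"
    · have e1 := ih (i + 1) (qs ++ [((if t = "``" then i else st), i)]) (-1)
      have e2 := ih (i + 1) ([((if t = "``" then i else st), i)]) (-1)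
      simp only [pqQuoteScan, if_pos h1, List.nil_append]
      rw [e1, e2]; simp
    · simp only [pqQuoteScan, if_neg h1]
      exact ih _ _ _

-- the closing deletion: set the "``" position to #QUOTE# and cut up to (and incl.) the "''"
lemma pqDel_close (pre G : List String) (s₀ : ℕ) (h : s₀ < pre.length) :
    pqDel ((pre ++ ["''"]) ++ G) ((s₀ : Int), (pre.length : Int)) =
      pre.take s₀ ++ "#QUOTE#" :: G := by
  simp only [pqDel, Int.toNat_natCast]
  rw [List.append_assoc, List.set_append_left _ _ (by omega),
      List.take_append_of_le_length (by rw [List.length_set]; omega),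
      List.drop_append, List.take_set]
  have h1 : (pre.take (s₀ + 1)).set s₀ "#QUOTE#" = pre.take s₀ ++ ["#QUOTE#"] := by
    rw [List.set_eq_take_cons_drop _ (by simp; omega)]
    simp [List.take_take]
  have h2 : (pre.set s₀ "#QUOTE#").drop (pre.length + 1) = [] := by
    rw [List.drop_eq_nil_iff]; simp
  have h3 : pre.length + 1 - (pre.set s₀ "#QUOTE#").length = 1 := by simp
  rw [h1, h2, h3]
  simp

lemma pqScan_open (ts : List String) (i : Int) (qs : List (Int × Int)) (st : Int) :
    pqQuoteScan ("``" :: ts) i qs st = pqQuoteScan ts (i + 1) qs i := by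
  simp [pqQuoteScan]

lemma pqScan_close (ts : List String) (i : Int) (qs : List (Int × Int)) (s₀ : ℕ) :
    pqQuoteScan ("''" :: ts) i qs ((s₀ : Nat) : Int) = pqQuoteScan ts (i + 1) (qs ++ [(((s₀ : Nat) : Int), i)]) (-1) := by
  simp [pqQuoteScan]

lemma pqScan_none (ts : List String) (t : String) (i : Int) (qs : List (Int × Int))
    (hbt : ¬ t = "``") : pqQuoteScan (t :: ts) i qs (-1) = pqQuoteScan ts (i + 1) qs (-1) := by
  simp [pqQuoteScan, hbt]

lemma pqScan_skip (ts : List String) (t : String) (i st : Int) (qs : List (Int × Int))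
    (hbt : ¬ t = "``") (hq : ¬ t = "''") :
    pqQuoteScan (t :: ts) i qs st = pqQuoteScan ts (i + 1) qs st := by
  simp [pqQuoteScan, hbt, hq]

lemma pqA_main (ts : List String) :
    (∀ pre : List String,
      ((pqQuoteScan ts (pre.length : Int) [] (-1)).1.foldr (fun q acc => pqDel acc q) (pre ++ ts))
        = pre ++ pqGo ts none) ∧
    (∀ (pre : List String) (s₀ : ℕ), s₀ < pre.length →
      ((pqQuoteScan ts (pre.length : Int) [] ((s₀ : Nat) : Int)).1.foldr (fun q acc => pqDel acc q) (pre ++ ts))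
        = pre.take s₀ ++ pqGo ts (some (pre.drop s₀))) := by
  induction ts with
  | nil =>
    constructor
    · intro pre; simp [pqQuoteScan, pqGo]
    · intro pre s₀ h; simp [pqQuoteScan, pqGo, List.take_append_drop]
  | cons t ts ih =>
    have hcast : ∀ pre : List String, ((pre.length : Int) + 1) = (((pre.length + 1 : ℕ)) : Int) := by
      intro pre; push_cast; ring
    constructor
    · intro pre
      by_cases hbt : t = "``"
      · subst hbt
        rw [pqScan_open, hcast pre]
        have e1 := (ih.2 (pre ++ ["``"]) pre.length (by simp))
        rw [show (pre ++ ["``"]).length = pre.length + 1 from by simp] at e1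
        rw [show pre ++ "``" :: ts = (pre ++ ["``"]) ++ ts from by simp, e1]
        rw [List.take_left, List.drop_left]
        simp [pqGo]
      · rw [pqScan_none _ _ _ _ hbt, hcast pre]
        have e1 := ih.1 (pre ++ [t])
        rw [show (pre ++ [t]).length = pre.length + 1 from by simp] at e1
        rw [show pre ++ t :: ts = (pre ++ [t]) ++ ts from by simp, e1]
        simp [pqGo, hbt]
    · intro pre s₀ hs
      by_cases hq : t = "''"
      · subst hq
        rw [pqScan_close, hcast pre, pqQuoteScan_acc, List.nil_append]
        simp only [List.singleton_append, List.foldr_cons]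
        have e1 := ih.1 (pre ++ ["''"])
        rw [show (pre ++ ["''"]).length = pre.length + 1 from by simp] at e1
        rw [show pre ++ "''" :: ts = (pre ++ ["''"]) ++ ts from by simp, e1]
        rw [pqDel_close pre (pqGo ts none) s₀ hs]
        simp [pqGo]
      · by_cases hbt : t = "``"
        · subst hbt
          rw [pqScan_open, hcast pre]
          have e1 := (ih.2 (pre ++ ["``"]) pre.length (by simp))
          rw [show (pre ++ ["``"]).length = pre.length + 1 from by simp] at e1
          rw [show pre ++ "``" :: ts = (pre ++ ["``"]) ++ ts from by simp, e1]
          rw [List.take_left, List.drop_left]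
          rw [show pqGo ("``" :: ts) (some (pre.drop s₀)) = pre.drop s₀ ++ pqGo ts (some ["``"]) from by simp [pqGo]]
          rw [← List.append_assoc, List.take_append_drop]
        · rw [pqScan_skip _ _ _ _ _ hbt hq, hcast pre]
          have e1 := ih.2 (pre ++ [t]) s₀ (by simp; omega)
          rw [show (pre ++ [t]).length = pre.length + 1 from by simp] at e1
          rw [show pre ++ t :: ts = (pre ++ [t]) ++ ts from by simp, e1]
          rw [List.take_append_of_le_length (by omega), List.drop_append_of_le_length (by omega)]
          simp [pqGo, hq, hbt]

lemma pqGo_no_open (ts : List String) (h : "``" ∉ ts) : pqGo ts none = ts := by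
  induction ts with
  | nil => rfl
  | cons t ts ih =>
    simp only [List.mem_cons, not_or] at h
    rw [pqGo, if_neg (fun e => h.1 e.symm)]
    exact congrArg (t :: ·) (ih h.2)

lemma pqAltStep_open (ts res : List String) (st : Option Nat) :
    pqAltLoop ("``" :: ts) res st = pqAltLoop ts (res ++ ["``"]) (some res.length) := by
  cases st <;> simp [pqAltLoop]

lemma pqAltStep_close (ts res : List String) (s : Nat) :
    pqAltLoop ("''" :: ts) res (some s) = pqAltLoop ts (res.take s ++ ["#QUOTE#"]) none := by
  simp [pqAltLoop]

lemma pqAltStep_skip (ts res : List String) (t : String) (st : Option Nat)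
    (hbt : ¬ t = "``") (hq : ¬ t = "''") :
    pqAltLoop (t :: ts) res st = pqAltLoop ts (res ++ [t]) st := by
  cases st <;> simp [pqAltLoop, hbt, hq]

lemma pqAltStep_noneq (ts res : List String) (t : String) (hbt : ¬ t = "``") :
    pqAltLoop (t :: ts) res none = pqAltLoop ts (res ++ [t]) none := by
  by_cases hq : t = "''"
  · subst hq; simp [pqAltLoop]
  · exact pqAltStep_skip ts res t none hbt hq

lemma pqAlt_main (ts : List String) :
    (∀ res : List String, pqAltLoop ts res none = res ++ pqGo ts none) ∧
    (∀ (res : List String) (s : ℕ), s < res.length →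
      pqAltLoop ts res (some s) = res.take s ++ pqGo ts (some (res.drop s))) := by
  induction ts with
  | nil =>
    constructor
    · intro res; simp [pqAltLoop, pqGo]
    · intro res s h; simp [pqAltLoop, pqGo, List.take_append_drop]
  | cons t ts ih =>
    constructor
    · intro res
      by_cases hbt : t = "``"
      · subst hbt
        rw [pqAltStep_open, ih.2 _ _ (by simp), List.take_left, List.drop_left]
        simp [pqGo]
      · rw [pqAltStep_noneq _ _ _ hbt, ih.1]
        simp [pqGo, hbt]
    · intro res s hs
      by_cases hq : t = "''"
      · subst hq
        rw [pqAltStep_close, ih.1]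
        simp [pqGo]
      · by_cases hbt : t = "``"
        · subst hbt
          rw [pqAltStep_open, ih.2 _ _ (by simp), List.take_left, List.drop_left]
          rw [show pqGo ("``" :: ts) (some (res.drop s)) = res.drop s ++ pqGo ts (some ["``"]) from by simp [pqGo]]
          rw [← List.append_assoc, List.take_append_drop]
        · rw [pqAltStep_skip _ _ _ _ hbt hq, ih.2 _ _ (by simp; omega)]
          rw [List.take_append_of_le_length (by omega), List.drop_append_of_le_length (by omega)]
          simp [pqGo, hq, hbt]

-- ===== VERDICT (by name: the statement is the Claim_ definition above) =====
theorem parse_quotes_spec : Claim_equal_parse_quotes := by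
  intro tokens _
  unfold Spec_parse_quotes parse_quotes parse_quotes_alt
  rw [(pqAlt_main tokens).1 []]
  simp only [List.nil_append]
  split_ifs with hmem
  · rw [List.foldl_reverse]
    have e1 := (pqA_main tokens).1 []
    simpa [pqDel] using e1
  · exact (pqGo_no_open tokens hmem).symm
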